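-- pv_equiv track=rewrite | github.com/Ferrari25/ParserASDPpy | Automatas.py | automata_oprel
-- ===== SOURCE A (Python) =====
-- ESTADO_FINAL = "ESTADO FINAL"
--
-- ESTADO_NO_FINAL = "NO ACEPTADO"
--
-- ESTADO_TRAMPA = "EN ESTADO TRAMPA"
--
-- def automata_oprel(lexema):
--         estadoactual=0
--         estadosfinales=[1]
--         for vcarac in lexema:
--             if estadoactual==0 and (vcarac=='<' or vcarac=='>' or vcarac=='='):
--                 estadoactual=1
--             else:
--                 estadoactual=-1
--                 break
--         if estadoactual==-1:
--             return ESTADO_TRAMPA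
--         if estadoactual in estadosfinales:
--              return ESTADO_FINAL
--         else:
--              return ESTADO_NO_FINAL
-- ===== SOURCE B (Python) =====
-- ESTADO_FINAL = "ESTADO FINAL"
-- ESTADO_NO_FINAL = "NO ACEPTADO"
-- ESTADO_TRAMPA = "EN ESTADO TRAMPA"
--
-- def automata_oprel(lexema):
--     chars = list(lexema)
--     if not chars:
--         return ESTADO_NO_FINAL
--     elif len(chars) == 1 and chars[0] in ('<', '>', '='):
--         return ESTADO_FINAL
--     else:
--         return ESTADO_TRAMPA
-- ===== Notes on version B (the rewrite author's own statement) =====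
-- stated objective: simpler
-- what changed: Replaced the explicit automaton state variable and loop by a direct closed-form length/membership characterization: empty -> NO ACEPTADO, single relational char -> ESTADO FINAL, anything else -> EN ESTADO TRAMPA.
import Mathlib
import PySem

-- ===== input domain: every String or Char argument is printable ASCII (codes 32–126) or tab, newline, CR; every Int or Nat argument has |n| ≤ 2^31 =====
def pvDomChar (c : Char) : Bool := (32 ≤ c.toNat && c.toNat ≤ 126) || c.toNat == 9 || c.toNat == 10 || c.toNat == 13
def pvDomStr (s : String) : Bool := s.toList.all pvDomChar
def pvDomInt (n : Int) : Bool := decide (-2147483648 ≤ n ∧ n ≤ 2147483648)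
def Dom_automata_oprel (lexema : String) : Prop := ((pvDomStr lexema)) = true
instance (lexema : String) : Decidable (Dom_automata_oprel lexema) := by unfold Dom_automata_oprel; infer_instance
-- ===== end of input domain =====

-- B replaces A's explicit automaton state loop by a closed-form length/membership test (objective: simpler).

-- ===== PORT A =====
-- loop over the characters with the break modelled as stopping at state -1
def automataLoopA : Int → List Char → Int
  | estadoactual, [] => estadoactual
  | estadoactual, vcarac :: rest =>
    if estadoactual == 0 && (vcarac == '<' || vcarac == '>' || vcarac == '=') then
      automataLoopA 1 rest
    else
      (-1 : Int)   -- estadoactual = -1; break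

def automata_oprel (lexema : String) : String :=
  let estadoactual := automataLoopA 0 lexema.toList
  let estadosfinales : List Int := [1]
  if estadoactual == -1 then "EN ESTADO TRAMPA"
  else if estadosfinales.contains estadoactual then "ESTADO FINAL"
  else "NO ACEPTADO"

-- ===== PORT B =====
def automata_oprel_alt (lexema : String) : String :=
  let chars := lexema.toList
  if chars.isEmpty then "NO ACEPTADO"
  else if chars.length == 1 && ['<', '>', '='].contains chars[0]! then "ESTADO FINAL"
  else "EN ESTADO TRAMPA"

-- ===== PRECONDITION & SPEC =====
def Spec_automata_oprel (lexema : String) (out : String) : Prop := out = automata_oprel_alt lexema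
instance (lexema : String) (out : String) : Decidable (Spec_automata_oprel lexema out) := by unfold Spec_automata_oprel; infer_instance

-- ===== CLAIM (what is proved, stated in full; the proofs are below) =====
def Claim_equal_automata_oprel : Prop := ∀ (lexema : String), Dom_automata_oprel lexema → Spec_automata_oprel lexema (automata_oprel lexema)

-- ===== LEMMAS AND PROOFS =====

lemma automata_eq_on_list (l : List Char) :
    (let estadoactual := automataLoopA 0 l
     if estadoactual == -1 then "EN ESTADO TRAMPA"
     else if ([1] : List Int).contains estadoactual then "ESTADO FINAL"
     else "NO ACEPTADO")
    = (if l.isEmpty then "NO ACEPTADO"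
       else if l.length == 1 && ['<', '>', '='].contains l[0]! then "ESTADO FINAL"
       else "EN ESTADO TRAMPA") := by
  match l with
  | [] => simp [automataLoopA]
  | [c] =>
    by_cases h : c = '<' ∨ c = '>' ∨ c = '='
    · rcases h with h | h | h <;> subst h <;> simp [automataLoopA]
    · push_neg at h
      obtain ⟨h1, h2, h3⟩ := h
      simp [automataLoopA, h1, h2, h3]
  | c :: d :: rest =>
    by_cases h : c = '<' ∨ c = '>' ∨ c = '='
    · rcases h with h | h | h <;> subst h <;> simp [automataLoopA]
    · push_neg at h
      obtain ⟨h1, h2, h3⟩ := h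
      simp [automataLoopA, h1, h2, h3]

-- ===== VERDICT (by name: the statement is the Claim_ definition above) =====
theorem automata_oprel_spec : Claim_equal_automata_oprel := by
  intro lexema _
  unfold Spec_automata_oprel automata_oprel automata_oprel_alt
  exact automata_eq_on_list lexema.toList
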